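-- pv_equiv track=rewrite | github.com/schneebergerlab/replicated-assemblies-centromere-study | bin/simulate.py | find_pairwise_points
-- ===== SOURCE A (Python) =====
-- def find_pairwise_points(align, pos):
--     pos_pairwise = -1  # Default to -1 if not found
--     align_seq1, align_seq2 = align[0], align[1]
--     align_pos1, align_pos2 = 0, 0
--
--     for i in range(len(align_seq1)):
--         if align_seq1[i] != '-':
--             align_pos1 += 1
--         if align_seq2[i] != '-':
--             align_pos2 += 1
--         if align_pos1 == pos:
--             pos_pairwise = align_pos2
--             break
--
--     return pos_pairwise
-- ===== SOURCE B (Python) =====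
-- def find_pairwise_points(align, pos):
--     seq1, seq2 = align[0], align[1]
--     # Locate the alignment column where seq1's running residue count first
--     # reaches pos.
--     col = -1
--     n = 0
--     for i, ch in enumerate(seq1):
--         if ch != '-':
--             n += 1
--         if n == pos:
--             col = i
--             break
--     if col == -1:
--         return -1
--     # Count the residues of seq2 up to and including that column.
--     window = seq2[:col + 1]
--     return len(window) - window.count('-')
-- ===== Notes on version B (the rewrite author's own statement) =====
-- stated objective: alternative
-- what changed: Replaces A's single interleaved scan maintaining two counters with a two-pass decomposition: a locate pass over seq1 alone finds the matching column, then the seq2 residue count is taken in closed form as len(window)-window.count('-') on the prefix; Pre_ excludes exactly the inputs where A raises IndexError (seq2 too short to cover the scanned columns).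
import Mathlib
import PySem

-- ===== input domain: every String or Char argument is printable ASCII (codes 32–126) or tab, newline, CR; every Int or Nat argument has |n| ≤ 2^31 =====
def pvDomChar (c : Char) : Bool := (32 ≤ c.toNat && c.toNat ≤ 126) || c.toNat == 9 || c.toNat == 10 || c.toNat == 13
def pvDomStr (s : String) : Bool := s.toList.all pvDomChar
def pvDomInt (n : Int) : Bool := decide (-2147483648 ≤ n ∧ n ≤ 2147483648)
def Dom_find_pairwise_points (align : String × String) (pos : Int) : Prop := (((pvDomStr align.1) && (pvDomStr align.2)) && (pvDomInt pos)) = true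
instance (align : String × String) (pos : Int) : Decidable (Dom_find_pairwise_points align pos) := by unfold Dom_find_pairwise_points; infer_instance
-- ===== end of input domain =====

-- B splits A's single interleaved two-counter scan into a locate pass over seq1
-- followed by a closed-form residue count on the seq2 prefix; same cost, different decomposition.

-- ===== PORT A =====
-- A's loop: for i in range(len(seq1)), maintaining both counters; `break` becomes the
-- early return.  seq2[i] is ported with pyGet?; the `none` branch is Python's
-- IndexError and is excluded by Pre_.
def findLoopA (s1 s2 : List Char) (pos : Int) (i : Nat) (p1 p2 : Int) : Int :=
  if h : i < s1.length then
    match PySem.List.pyGet? s2 (i : Int) with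
    | none => -1    -- IndexError in Python; outside Pre_
    | some c2 =>
      let p1' := if s1[i] ≠ '-' then p1 + 1 else p1
      let p2' := if c2 ≠ '-' then p2 + 1 else p2
      if p1' = pos then p2' else findLoopA s1 s2 pos (i + 1) p1' p2'
  else -1
  termination_by s1.length - i

def find_pairwise_points (align : String × String) (pos : Int) : Int :=
  findLoopA align.1.toList align.2.toList pos 0 0 0

-- ===== PORT B =====
-- Source B's locate pass: index of the column where seq1's running residue count
-- first reaches pos, or -1.
def locateB (s : List Char) (i : Nat) (n pos : Int) : Int :=
  match s with
  | [] => -1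
  | ch :: rest =>
    let n' := if ch ≠ '-' then n + 1 else n
    if n' = pos then (i : Int) else locateB rest (i + 1) n' pos

def find_pairwise_points_alt (align : String × String) (pos : Int) : Int :=
  let col := locateB align.1.toList 0 0 pos
  if col = -1 then -1
  else
    let window := align.2.toList.take (col.toNat + 1)
    (window.length : Int) - window.count '-'

-- ===== PRECONDITION & SPEC =====
-- Pre_ holds exactly where A returns: either seq2 covers all of seq1, or the break
-- fires at a column seq2 still covers; on all other inputs A raises IndexError.
def Pre_find_pairwise_points (align : String × String) (pos : Int) : Prop :=
  align.1.toList.length ≤ align.2.toList.length ∨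
    ∃ j ∈ List.range align.2.toList.length,
      (((align.1.toList.take (j + 1)).length : Int) - (align.1.toList.take (j + 1)).count '-') = pos
instance (align : String × String) (pos : Int) : Decidable (Pre_find_pairwise_points align pos) := by unfold Pre_find_pairwise_points; infer_instance

def pvWitness_find_pairwise_points : (String × String) × Int := (("a-b", "ab-"), 2)

def Spec_find_pairwise_points (align : String × String) (pos : Int) (out : Int) : Prop := out = find_pairwise_points_alt align pos
instance (align : String × String) (pos : Int) (out : Int) : Decidable (Spec_find_pairwise_points align pos out) := by unfold Spec_find_pairwise_points; infer_instance

-- ===== CLAIM (what is proved, stated in full; the proofs are below) =====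
def Claim_equal_find_pairwise_points : Prop := ∀ (align : String × String) (pos : Int), Dom_find_pairwise_points align pos → Pre_find_pairwise_points align pos → Spec_find_pairwise_points align pos (find_pairwise_points align pos)

-- ===== LEMMAS AND PROOFS =====

-- residue (non-gap) count, as B computes it
def cntNG (l : List Char) : Int := (l.length : Int) - l.count '-'

theorem cntNG_cons (c : Char) (l : List Char) :
    cntNG (c :: l) = (if c ≠ '-' then 1 else 0) + cntNG l := by
  simp only [cntNG, List.count_cons, List.length_cons]
  split <;> rename_i h <;> simp_all <;> push_cast <;> ring

theorem cntNG_take_succ (s : List Char) (i : Nat) (h : i < s.length) :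
    cntNG (s.take (i + 1)) = cntNG (s.take i) + (if s[i] ≠ '-' then 1 else 0) := by
  rw [List.take_succ, List.getElem?_eq_getElem h]
  simp only [cntNG, List.length_append, List.count_append, Option.toList_some]
  split <;> simp_all [List.count_cons] <;> push_cast <;> ring

-- unfolding equation for locateB on a cons
theorem locateB_cons (c : Char) (r : List Char) (i : Nat) (n pos : Int) :
    locateB (c :: r) i n pos =
      (if (if c ≠ '-' then n + 1 else n) = pos then (i : Int)
       else locateB r (i + 1) (if c ≠ '-' then n + 1 else n) pos) := rfl

-- structural version of A's loop (suffix of seq1 consumed head-first, absolute index i)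
def stepA (s1rem s2 : List Char) (i : Nat) (p1 p2 pos : Int) : Int :=
  match s1rem with
  | [] => -1
  | c1 :: r1 =>
    match s2[i]? with
    | none => -1
    | some c2 =>
      let p1' := if c1 ≠ '-' then p1 + 1 else p1
      let p2' := if c2 ≠ '-' then p2 + 1 else p2
      if p1' = pos then p2' else stepA r1 s2 (i + 1) p1' p2' pos

theorem findLoopA_eq_stepA (s1 s2 : List Char) (pos : Int) :
    ∀ k i p1 p2, s1.length - i ≤ k →
      findLoopA s1 s2 pos i p1 p2 = stepA (s1.drop i) s2 i p1 p2 pos := by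
  intro k
  induction k with
  | zero =>
    intro i p1 p2 hk
    rw [findLoopA, List.drop_eq_nil_of_le (by omega)]
    simp [show ¬ i < s1.length by omega, stepA]
  | succ k ih =>
    intro i p1 p2 hk
    by_cases h : i < s1.length
    · rw [findLoopA]
      simp only [h, dif_pos]
      rw [PySem.List.pyGet?_natCast]
      rw [List.drop_eq_getElem_cons h]
      simp only [stepA]
      cases hg : s2[i]? with
      | none => rfl
      | some c2 =>
        dsimp only
        by_cases hm : (if s1[i] ≠ '-' then p1 + 1 else p1) = pos
        · rw [if_pos hm, if_pos hm]
        · rw [if_neg hm, if_neg hm]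
          exact ih (i + 1) _ _ (by omega)
    · rw [findLoopA, List.drop_eq_nil_of_le (by omega)]
      simp [h, stepA]

-- bounds of a successful locate
theorem locateB_bounds (s : List Char) :
    ∀ (i : Nat) (n pos : Int), locateB s i n pos ≠ -1 →
      i ≤ (locateB s i n pos).toNat ∧ (locateB s i n pos).toNat < i + s.length := by
  induction s with
  | nil => intro i n pos h; simp [locateB] at h
  | cons c r ih =>
    intro i n pos h
    rw [locateB_cons] at h ⊢
    by_cases hm : (if c ≠ '-' then n + 1 else n) = pos
    · rw [if_pos hm]
      simp only [Int.toNat_natCast, List.length_cons]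
      omega
    · rw [if_neg hm] at h ⊢
      have := ih (i + 1) _ pos h
      simp only [List.length_cons]
      omega

-- a matching column implies locate succeeds no later than it
theorem locateB_found (s : List Char) :
    ∀ (i : Nat) (n pos : Int) (j : Nat), j < s.length →
      n + cntNG (s.take (j + 1)) = pos →
      locateB s i n pos ≠ -1 ∧ (locateB s i n pos).toNat ≤ i + j := by
  induction s with
  | nil => intro i n pos j hj; simp at hj
  | cons c r ih =>
    intro i n pos j hj hcnt
    rw [locateB_cons]
    by_cases hm : (if c ≠ '-' then n + 1 else n) = pos
    · rw [if_pos hm]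
      constructor
      · simp
      · simp only [Int.toNat_natCast]; omega
    · rw [if_neg hm]
      cases j with
      | zero =>
        exfalso
        apply hm
        rw [List.take_succ_cons, List.take_zero, cntNG_cons] at hcnt
        have hnil : cntNG [] = 0 := by simp [cntNG]
        rw [hnil] at hcnt
        rcases eq_or_ne c '-' with hc | hc
        · rw [if_neg (fun hn => hn hc)] at hcnt ⊢; omega
        · rw [if_pos hc] at hcnt ⊢; omega
      | succ j' =>
        rw [List.take_succ_cons, cntNG_cons] at hcnt
        have hcnt' : (if c ≠ '-' then n + 1 else n) + cntNG (r.take (j' + 1)) = pos := by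
          rcases eq_or_ne c '-' with hc | hc
          · rw [if_neg (fun hn => hn hc)] at hcnt ⊢; omega
          · rw [if_pos hc] at hcnt ⊢; omega
        have := ih (i + 1) _ pos j' (by simp only [List.length_cons] at hj; omega) hcnt'
        exact ⟨this.1, by omega⟩

-- A's interleaved loop equals B's locate-then-count, given seq2 covers the scan
theorem stepA_eq_locate (s1rem : List Char) :
    ∀ (s2 : List Char) (i : Nat) (n p2 pos : Int),
      p2 = cntNG (s2.take i) →
      (locateB s1rem i n pos = -1 → i + s1rem.length ≤ s2.length) →
      (locateB s1rem i n pos ≠ -1 → (locateB s1rem i n pos).toNat < s2.length) →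
      stepA s1rem s2 i n p2 pos =
        (if locateB s1rem i n pos = -1 then -1
         else cntNG (s2.take ((locateB s1rem i n pos).toNat + 1))) := by
  induction s1rem with
  | nil => intro s2 i n p2 pos _ _ _; simp [stepA, locateB]
  | cons c1 r1 ih =>
    intro s2 i n p2 pos hp2 h1 h2
    have hi : i < s2.length := by
      by_cases hL : locateB (c1 :: r1) i n pos = -1
      · have := h1 hL
        simp only [List.length_cons] at this
        omega
      · have hb := locateB_bounds (c1 :: r1) i n pos hL
        have := h2 hL
        omega
    have hp2' : (if s2[i] ≠ '-' then p2 + 1 else p2) = cntNG (s2.take (i + 1)) := by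
      rw [cntNG_take_succ s2 i hi, hp2]
      rcases eq_or_ne s2[i] '-' with hg | hg
      · rw [if_neg (fun hn => hn hg), if_neg (fun hn => hn hg)]; ring
      · rw [if_pos hg, if_pos hg]
    simp only [stepA, List.getElem?_eq_getElem hi]
    rw [locateB_cons] at h1 h2 ⊢
    by_cases hm : (if c1 ≠ '-' then n + 1 else n) = pos
    · rw [if_pos hm, if_pos hm]
      rw [if_neg (show ((i : Nat) : Int) ≠ -1 by omega), Int.toNat_natCast]
      exact hp2'
    · rw [if_neg hm] at h1 h2
      rw [if_neg hm, if_neg hm]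
      apply ih s2 (i + 1) _ _ pos hp2'
      · intro hnone
        have := h1 hnone
        simp only [List.length_cons] at this
        omega
      · intro hsome
        exact h2 hsome

-- ===== VERDICT (by name: the statement is the Claim_ definition above) =====
theorem find_pairwise_points_spec : Claim_equal_find_pairwise_points := by
  intro align pos _ hpre
  unfold Spec_find_pairwise_points find_pairwise_points find_pairwise_points_alt
  rw [findLoopA_eq_stepA align.1.toList align.2.toList pos align.1.toList.length 0 0 0 (by omega)]
  simp only [List.drop_zero]
  have hpre' : align.1.toList.length ≤ align.2.toList.length ∨
      ∃ j : Nat, j < align.1.toList.length ∧ j < align.2.toList.length ∧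
        cntNG (align.1.toList.take (j + 1)) = pos := by
    rcases hpre with h | ⟨j, hj, hc⟩
    · exact Or.inl h
    · rw [List.mem_range] at hj
      by_cases hjl : j < align.1.toList.length
      · exact Or.inr ⟨j, hjl, hj, hc⟩
      · exact Or.inl (by omega)
  have h1 : locateB align.1.toList 0 0 pos = -1 →
      0 + align.1.toList.length ≤ align.2.toList.length := by
    intro hnone
    rcases hpre' with h | ⟨j, hj1, hj2, hc⟩
    · omega
    · exact absurd hnone (locateB_found align.1.toList 0 0 pos j hj1 (by rw [zero_add]; exact hc)).1
  have h2 : locateB align.1.toList 0 0 pos ≠ -1 →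
      (locateB align.1.toList 0 0 pos).toNat < align.2.toList.length := by
    intro hsome
    rcases hpre' with h | ⟨j, hj1, hj2, hc⟩
    · have := locateB_bounds align.1.toList 0 0 pos hsome
      omega
    · have := (locateB_found align.1.toList 0 0 pos j hj1 (by rw [zero_add]; exact hc)).2
      omega
  rw [stepA_eq_locate align.1.toList align.2.toList 0 0 0 pos (by simp [cntNG]) h1 h2]
  by_cases h : locateB align.1.toList 0 0 pos = -1 <;> simp [h, cntNG]
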